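-- pv_equiv track=rewrite | github.com/Josh-Amos/wb272 | Tests/assignment4/isbn.py | isbn13_to_10
-- ===== SOURCE A (Python) =====
-- def isbn13_to_10(is13):
--     """Converts the isbn13 number to isbn10 number"""
--     is9 = is13[3:12]
--     digits = [0,1,2,3,4,5,6,7,8,9,10]
--     index  = ["0","1","2","3","4","5","6","7","8","9","X"]
--     num = []
--     solved = []
--
--     for i in range(len(is9)):
--         num.append(int(is9[i]))
--
--     for i in range(2,len(num) + 2):
--         num[-i + 1] = num[-i + 1] * i
--
--     checksum = sum(num)
--
--     for i in range(len(digits)):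
--         solved.append((checksum + digits[i]) % 11)
--
--     check = solved.index(0)
--     check = index[check]
--
--     is10 = is9 + check
--
--     return is10
-- ===== SOURCE B (Python) =====
-- def isbn13_to_10(is13):
--     """Converts the isbn13 number to isbn10 number"""
--     is9 = is13[3:12]
--     n = len(is9)
--     checksum = 0
--     for j, ch in enumerate(is9):
--         checksum += int(ch) * (n + 1 - j)
--     c = (-checksum) % 11
--     return is9 + ('X' if c == 10 else str(c))
-- ===== Notes on version B (the rewrite author's own statement) =====
-- stated objective: simpler
-- what changed: B computes the weighted checksum in a single enumerate pass and obtains the check digit directly by the closed form (-checksum) % 11, dropping A's second in-place weighting loop, the residue table solved[] and the linear solved.index(0) search.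
import Mathlib
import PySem

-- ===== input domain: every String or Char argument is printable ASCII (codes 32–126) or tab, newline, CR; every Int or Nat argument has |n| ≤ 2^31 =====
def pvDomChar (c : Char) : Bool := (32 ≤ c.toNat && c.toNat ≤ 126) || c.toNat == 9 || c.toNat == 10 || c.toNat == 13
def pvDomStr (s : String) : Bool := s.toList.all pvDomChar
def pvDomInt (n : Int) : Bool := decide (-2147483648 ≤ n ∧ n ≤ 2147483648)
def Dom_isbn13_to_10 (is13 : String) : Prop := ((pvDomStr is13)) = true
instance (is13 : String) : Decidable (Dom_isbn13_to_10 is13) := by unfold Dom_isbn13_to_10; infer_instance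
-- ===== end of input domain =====

-- B replaces A's residue table and linear search for the check digit by the closed form (-checksum) % 11,
-- computing the weighted checksum in one enumerate pass (objective: simpler; no measured speed claim).

-- ===== PORT A =====
-- int(one-character string) — shared by both ports, since both Pythons call int() on single characters
def pvDigit (c : Char) : Int := (PySem.Int.ofChars? [c]).getD 0

def isbn13_to_10 (is13 : String) : String :=
  let is9 : List Char := PySem.List.slice is13.toList (some 3) (some 12)
  let digits : List Int := [0,1,2,3,4,5,6,7,8,9,10]
  let index : List Char := ['0','1','2','3','4','5','6','7','8','9','X']
  let num : List Int :=
    (PySem.List.pyRange 0 (PySem.List.len is9) 1).foldl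
      (fun acc i => acc ++ [pvDigit (PySem.List.pyGetD is9 i ' ')]) []
  let num :=
    (PySem.List.pyRange 2 (PySem.List.len num + 2) 1).foldl
      (fun nm i => PySem.List.pySetD nm (-i + 1) (PySem.List.pyGetD nm (-i + 1) 0 * i)) num
  let checksum : Int := num.sum
  let solved : List Int :=
    (PySem.List.pyRange 0 (PySem.List.len digits) 1).foldl
      (fun acc i => acc ++ [PySem.Int.mod (checksum + PySem.List.pyGetD digits i 0) 11]) []
  let check : Int := ((PySem.List.index? solved 0).getD 0 : Nat)
  let check : Char := PySem.List.pyGetD index check ' '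
  String.ofList (is9 ++ [check])

-- ===== PORT B =====
def isbn13_to_10_alt (is13 : String) : String :=
  let is9 : List Char := PySem.List.slice is13.toList (some 3) (some 12)
  let n : Int := PySem.List.len is9
  let checksum : Int :=
    (PySem.List.enumerate is9 0).foldl
      (fun acc p => acc + pvDigit p.2 * (n + 1 - p.1)) 0
  let c : Int := PySem.Int.mod (-checksum) 11
  String.ofList (is9 ++ (if c = 10 then ['X'] else PySem.Int.toChars c))

-- ===== PRECONDITION & SPEC =====
-- Pre_: every character of is13[3:12] is a decimal digit; on any other character int() raises ValueError in A.
def Pre_isbn13_to_10 (is13 : String) : Prop :=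
  ((PySem.List.slice is13.toList (some 3) (some 12)).all (fun c => c.isDigit)) = true
instance (is13 : String) : Decidable (Pre_isbn13_to_10 is13) := by unfold Pre_isbn13_to_10; infer_instance

def pvWitness_isbn13_to_10 : String := "978014300723"

def Spec_isbn13_to_10 (is13 : String) (out : String) : Prop := out = isbn13_to_10_alt is13
instance (is13 : String) (out : String) : Decidable (Spec_isbn13_to_10 is13 out) := by unfold Spec_isbn13_to_10; infer_instance

-- ===== CLAIM (what is proved, stated in full; the proofs are below) =====
def Claim_equal_isbn13_to_10 : Prop := ∀ (is13 : String), Dom_isbn13_to_10 is13 → Pre_isbn13_to_10 is13 → Spec_isbn13_to_10 is13 (isbn13_to_10 is13)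

-- ===== LEMMAS AND PROOFS =====

-- descending weights: pvWts w [d0, d1, ...] = [d0*w, d1*(w-1), ...]
def pvWts (w : Int) : List Int → List Int
  | [] => []
  | a :: l => a * w :: pvWts (w - 1) l

lemma pvWts_cons (w a : Int) (l : List Int) : pvWts w (a :: l) = a * w :: pvWts (w - 1) l := rfl

lemma length_pvWts (w : Int) (l : List Int) : (pvWts w l).length = l.length := by
  induction l generalizing w with
  | nil => rfl
  | cons a l ih => simp [pvWts_cons, ih]

lemma pvSetD_neg {α : Type} (ys : List α) (k : Nat) (v : α) (hk : 0 < k) (hk' : k ≤ ys.length) :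
    PySem.List.pySetD ys (-(k : Int)) v = ys.set (ys.length - k) v := by
  unfold PySem.List.pySetD PySem.List.pySet? PySem.List.pyIdx?
  have h1 : ¬ (0 ≤ -(k:Int)) := by omega
  have h2 : -((ys.length:Int)) ≤ -(k:Int) := by omega
  simp only [h1, if_false, h2, if_true]
  simp

lemma pvSet_at_join {α : Type} (t : List α) (x v : α) (w : List α) (k : Nat) (hk : k = t.length) :
    (t ++ x :: w).set k v = t ++ v :: w := by subst hk; simp

lemma pvLoopA_inv (xs : List Int) (m : Nat) (hm : m ≤ xs.length) :
    (PySem.List.pyRange 2 ((m : Int) + 2) 1).foldl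
      (fun nm i => PySem.List.pySetD nm (-i + 1) (PySem.List.pyGetD nm (-i + 1) 0 * i)) xs
    = xs.take (xs.length - m) ++ pvWts ((m : Int) + 1) (xs.drop (xs.length - m)) := by
  induction m with
  | zero =>
    simp [pvWts]
  | succ m ih =>
    have hmn : m ≤ xs.length := by omega
    have hcast : ((m+1 : Nat) : Int) + 2 = (((m:Int) + 2)) + 1 := by push_cast; ring
    rw [hcast, PySem.List.pyRange_one_succ_right (show (2:Int) ≤ (m:Int)+2 by omega),
        List.foldl_append, ih hmn]
    set L := xs.take (xs.length - m) ++ pvWts ((m : Int) + 1) (xs.drop (xs.length - m)) with hL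
    have hlenTake : (xs.take (xs.length - m)).length = xs.length - m := by
      rw [List.length_take]; omega
    have hlenL : L.length = xs.length := by
      rw [hL, List.length_append, length_pvWts, hlenTake, List.length_drop]; omega
    have hidx : -((m:Int) + 2) + 1 = -((m+1 : Nat) : Int) := by push_cast; ring
    simp only [List.foldl_cons, List.foldl_nil, hidx]
    have hL1 : xs.length - (m+1) < xs.length := by omega
    have hget : PySem.List.pyGetD L (-((m+1 : Nat) : Int)) 0 = xs[xs.length - (m+1)] := by
      rw [PySem.List.pyGetD_neg_natCast L (m+1) 0 (by omega) (by omega)]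
      have hi : L.length - (m+1) = xs.length - (m+1) := by omega
      refine Eq.trans (getElem_congr rfl hi (by omega)) ?_
      simp only [hL]
      rw [List.getElem_append_left (by rw [hlenTake]; omega)]
      exact List.getElem_take
    rw [hget, pvSetD_neg L (m+1) _ (by omega) (by omega), hlenL]
    have hsplit : xs.take (xs.length - m) = xs.take (xs.length - (m+1)) ++ [xs[xs.length - (m+1)]] := by
      have h1 : xs.length - m = (xs.length - (m+1)) + 1 := by omega
      rw [h1, List.take_add_one]
      simp [List.getElem?_eq_getElem hL1]
    have hlen2 : (xs.take (xs.length - (m+1))).length = xs.length - (m+1) := by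
      rw [List.length_take]; omega
    have hdrop : xs.drop (xs.length - (m+1)) = xs[xs.length-(m+1)] :: xs.drop (xs.length - m) := by
      have h1 : xs.length - (m+1) + 1 = xs.length - m := by omega
      rw [List.drop_eq_getElem_cons hL1, h1]
    rw [hL, hsplit, List.append_assoc, List.singleton_append, hdrop, pvWts_cons,
        pvSet_at_join _ _ _ _ _ hlen2.symm]
    have w1 : ((m+1 : Nat) : Int) + 1 = (m : Int) + 2 := by push_cast; ring
    rw [w1, show (m : Int) + 2 - 1 = (m : Int) + 1 by ring]

-- B's enumerate pass produces the same descending-weight list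
lemma pvEnum_wts (l : List Char) (s w : Int) :
    (PySem.List.enumerate l s).map (fun p => pvDigit p.2 * (w - p.1)) = pvWts (w - s) (l.map pvDigit) := by
  induction l generalizing s with
  | nil => simp [PySem.List.enumerate_nil, pvWts]
  | cons c l ih =>
    rw [PySem.List.enumerate_cons]
    simp only [List.map, pvWts_cons, ih]
    congr 2
    ring

-- the check-digit tail: A's residue table + linear index search = B's closed form (-checksum) % 11
set_option maxHeartbeats 1000000 in
lemma pvTail_eq (c : Int) :
    [PySem.List.pyGetD ['0','1','2','3','4','5','6','7','8','9','X']
      (((PySem.List.index?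
          ((PySem.List.pyRange 0 (PySem.List.len ([0,1,2,3,4,5,6,7,8,9,10] : List Int)) 1).foldl
            (fun acc i => acc ++ [PySem.Int.mod (c + PySem.List.pyGetD ([0,1,2,3,4,5,6,7,8,9,10] : List Int) i 0) 11]) [])
          0).getD 0 : Nat) : Int) ' ']
    = (if PySem.Int.mod (-c) 11 = 10 then ['X'] else PySem.Int.toChars (PySem.Int.mod (-c) 11)) := by
  have hs : ((PySem.List.pyRange 0 (PySem.List.len ([0,1,2,3,4,5,6,7,8,9,10] : List Int)) 1).foldl
            (fun acc i => acc ++ [PySem.Int.mod (c + PySem.List.pyGetD ([0,1,2,3,4,5,6,7,8,9,10] : List Int) i 0) 11]) [])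
      = [PySem.Int.mod (c+0) 11, PySem.Int.mod (c+1) 11, PySem.Int.mod (c+2) 11, PySem.Int.mod (c+3) 11,
         PySem.Int.mod (c+4) 11, PySem.Int.mod (c+5) 11, PySem.Int.mod (c+6) 11, PySem.Int.mod (c+7) 11,
         PySem.Int.mod (c+8) 11, PySem.Int.mod (c+9) 11, PySem.Int.mod (c+10) 11] := by
    rw [show PySem.List.pyRange 0 (PySem.List.len ([0,1,2,3,4,5,6,7,8,9,10] : List Int)) 1 = [0,1,2,3,4,5,6,7,8,9,10] by decide]
    simp [PySem.List.pyGetD, PySem.List.pyGet?, PySem.List.pyIdx?]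
  rw [hs]
  simp only [PySem.Int.mod_eq_emod_of_pos (show (0:Int) < 11 by norm_num)]
  have hv : c % 11 = 0 ∨ c % 11 = 1 ∨ c % 11 = 2 ∨ c % 11 = 3 ∨ c % 11 = 4 ∨ c % 11 = 5 ∨ c % 11 = 6 ∨ c % 11 = 7 ∨ c % 11 = 8 ∨ c % 11 = 9 ∨ c % 11 = 10 := by omega
  rcases hv with h|h|h|h|h|h|h|h|h|h|h
  · obtain ⟨q, hq⟩ : ∃ q, c = 11*q + 0 := ⟨c/11, by omega⟩
    subst hq
    simp only [show (11*q+0+0) % 11 = 0 by omega,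
      show (11*q+0+1) % 11 = 1 by omega,
      show (11*q+0+2) % 11 = 2 by omega,
      show (11*q+0+3) % 11 = 3 by omega,
      show (11*q+0+4) % 11 = 4 by omega,
      show (11*q+0+5) % 11 = 5 by omega,
      show (11*q+0+6) % 11 = 6 by omega,
      show (11*q+0+7) % 11 = 7 by omega,
      show (11*q+0+8) % 11 = 8 by omega,
      show (11*q+0+9) % 11 = 9 by omega,
      show (11*q+0+10) % 11 = 10 by omega,
      show (-(11*q+0)) % 11 = 0 by omega]
    decide
  · obtain ⟨q, hq⟩ : ∃ q, c = 11*q + 1 := ⟨c/11, by omega⟩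
    subst hq
    simp only [show (11*q+1+0) % 11 = 1 by omega,
      show (11*q+1+1) % 11 = 2 by omega,
      show (11*q+1+2) % 11 = 3 by omega,
      show (11*q+1+3) % 11 = 4 by omega,
      show (11*q+1+4) % 11 = 5 by omega,
      show (11*q+1+5) % 11 = 6 by omega,
      show (11*q+1+6) % 11 = 7 by omega,
      show (11*q+1+7) % 11 = 8 by omega,
      show (11*q+1+8) % 11 = 9 by omega,
      show (11*q+1+9) % 11 = 10 by omega,
      show (11*q+1+10) % 11 = 0 by omega,
      show (-(11*q+1)) % 11 = 10 by omega]
    decide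
  · obtain ⟨q, hq⟩ : ∃ q, c = 11*q + 2 := ⟨c/11, by omega⟩
    subst hq
    simp only [show (11*q+2+0) % 11 = 2 by omega,
      show (11*q+2+1) % 11 = 3 by omega,
      show (11*q+2+2) % 11 = 4 by omega,
      show (11*q+2+3) % 11 = 5 by omega,
      show (11*q+2+4) % 11 = 6 by omega,
      show (11*q+2+5) % 11 = 7 by omega,
      show (11*q+2+6) % 11 = 8 by omega,
      show (11*q+2+7) % 11 = 9 by omega,
      show (11*q+2+8) % 11 = 10 by omega,
      show (11*q+2+9) % 11 = 0 by omega,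
      show (11*q+2+10) % 11 = 1 by omega,
      show (-(11*q+2)) % 11 = 9 by omega]
    decide
  · obtain ⟨q, hq⟩ : ∃ q, c = 11*q + 3 := ⟨c/11, by omega⟩
    subst hq
    simp only [show (11*q+3+0) % 11 = 3 by omega,
      show (11*q+3+1) % 11 = 4 by omega,
      show (11*q+3+2) % 11 = 5 by omega,
      show (11*q+3+3) % 11 = 6 by omega,
      show (11*q+3+4) % 11 = 7 by omega,
      show (11*q+3+5) % 11 = 8 by omega,
      show (11*q+3+6) % 11 = 9 by omega,
      show (11*q+3+7) % 11 = 10 by omega,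
      show (11*q+3+8) % 11 = 0 by omega,
      show (11*q+3+9) % 11 = 1 by omega,
      show (11*q+3+10) % 11 = 2 by omega,
      show (-(11*q+3)) % 11 = 8 by omega]
    decide
  · obtain ⟨q, hq⟩ : ∃ q, c = 11*q + 4 := ⟨c/11, by omega⟩
    subst hq
    simp only [show (11*q+4+0) % 11 = 4 by omega,
      show (11*q+4+1) % 11 = 5 by omega,
      show (11*q+4+2) % 11 = 6 by omega,
      show (11*q+4+3) % 11 = 7 by omega,
      show (11*q+4+4) % 11 = 8 by omega,
      show (11*q+4+5) % 11 = 9 by omega,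
      show (11*q+4+6) % 11 = 10 by omega,
      show (11*q+4+7) % 11 = 0 by omega,
      show (11*q+4+8) % 11 = 1 by omega,
      show (11*q+4+9) % 11 = 2 by omega,
      show (11*q+4+10) % 11 = 3 by omega,
      show (-(11*q+4)) % 11 = 7 by omega]
    decide
  · obtain ⟨q, hq⟩ : ∃ q, c = 11*q + 5 := ⟨c/11, by omega⟩
    subst hq
    simp only [show (11*q+5+0) % 11 = 5 by omega,
      show (11*q+5+1) % 11 = 6 by omega,
      show (11*q+5+2) % 11 = 7 by omega,
      show (11*q+5+3) % 11 = 8 by omega,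
      show (11*q+5+4) % 11 = 9 by omega,
      show (11*q+5+5) % 11 = 10 by omega,
      show (11*q+5+6) % 11 = 0 by omega,
      show (11*q+5+7) % 11 = 1 by omega,
      show (11*q+5+8) % 11 = 2 by omega,
      show (11*q+5+9) % 11 = 3 by omega,
      show (11*q+5+10) % 11 = 4 by omega,
      show (-(11*q+5)) % 11 = 6 by omega]
    decide
  · obtain ⟨q, hq⟩ : ∃ q, c = 11*q + 6 := ⟨c/11, by omega⟩
    subst hq
    simp only [show (11*q+6+0) % 11 = 6 by omega,
      show (11*q+6+1) % 11 = 7 by omega,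
      show (11*q+6+2) % 11 = 8 by omega,
      show (11*q+6+3) % 11 = 9 by omega,
      show (11*q+6+4) % 11 = 10 by omega,
      show (11*q+6+5) % 11 = 0 by omega,
      show (11*q+6+6) % 11 = 1 by omega,
      show (11*q+6+7) % 11 = 2 by omega,
      show (11*q+6+8) % 11 = 3 by omega,
      show (11*q+6+9) % 11 = 4 by omega,
      show (11*q+6+10) % 11 = 5 by omega,
      show (-(11*q+6)) % 11 = 5 by omega]
    decide
  · obtain ⟨q, hq⟩ : ∃ q, c = 11*q + 7 := ⟨c/11, by omega⟩
    subst hq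
    simp only [show (11*q+7+0) % 11 = 7 by omega,
      show (11*q+7+1) % 11 = 8 by omega,
      show (11*q+7+2) % 11 = 9 by omega,
      show (11*q+7+3) % 11 = 10 by omega,
      show (11*q+7+4) % 11 = 0 by omega,
      show (11*q+7+5) % 11 = 1 by omega,
      show (11*q+7+6) % 11 = 2 by omega,
      show (11*q+7+7) % 11 = 3 by omega,
      show (11*q+7+8) % 11 = 4 by omega,
      show (11*q+7+9) % 11 = 5 by omega,
      show (11*q+7+10) % 11 = 6 by omega,
      show (-(11*q+7)) % 11 = 4 by omega]
    decide
  · obtain ⟨q, hq⟩ : ∃ q, c = 11*q + 8 := ⟨c/11, by omega⟩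
    subst hq
    simp only [show (11*q+8+0) % 11 = 8 by omega,
      show (11*q+8+1) % 11 = 9 by omega,
      show (11*q+8+2) % 11 = 10 by omega,
      show (11*q+8+3) % 11 = 0 by omega,
      show (11*q+8+4) % 11 = 1 by omega,
      show (11*q+8+5) % 11 = 2 by omega,
      show (11*q+8+6) % 11 = 3 by omega,
      show (11*q+8+7) % 11 = 4 by omega,
      show (11*q+8+8) % 11 = 5 by omega,
      show (11*q+8+9) % 11 = 6 by omega,
      show (11*q+8+10) % 11 = 7 by omega,
      show (-(11*q+8)) % 11 = 3 by omega]
    decide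
  · obtain ⟨q, hq⟩ : ∃ q, c = 11*q + 9 := ⟨c/11, by omega⟩
    subst hq
    simp only [show (11*q+9+0) % 11 = 9 by omega,
      show (11*q+9+1) % 11 = 10 by omega,
      show (11*q+9+2) % 11 = 0 by omega,
      show (11*q+9+3) % 11 = 1 by omega,
      show (11*q+9+4) % 11 = 2 by omega,
      show (11*q+9+5) % 11 = 3 by omega,
      show (11*q+9+6) % 11 = 4 by omega,
      show (11*q+9+7) % 11 = 5 by omega,
      show (11*q+9+8) % 11 = 6 by omega,
      show (11*q+9+9) % 11 = 7 by omega,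
      show (11*q+9+10) % 11 = 8 by omega,
      show (-(11*q+9)) % 11 = 2 by omega]
    decide
  · obtain ⟨q, hq⟩ : ∃ q, c = 11*q + 10 := ⟨c/11, by omega⟩
    subst hq
    simp only [show (11*q+10+0) % 11 = 10 by omega,
      show (11*q+10+1) % 11 = 0 by omega,
      show (11*q+10+2) % 11 = 1 by omega,
      show (11*q+10+3) % 11 = 2 by omega,
      show (11*q+10+4) % 11 = 3 by omega,
      show (11*q+10+5) % 11 = 4 by omega,
      show (11*q+10+6) % 11 = 5 by omega,
      show (11*q+10+7) % 11 = 6 by omega,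
      show (11*q+10+8) % 11 = 7 by omega,
      show (11*q+10+9) % 11 = 8 by omega,
      show (11*q+10+10) % 11 = 9 by omega,
      show (-(11*q+10)) % 11 = 1 by omega]
    decide

-- both checksums are the sum of the same descending-weight list
lemma pvChecksum_eq (l : List Char) :
    ((PySem.List.pyRange 2 (PySem.List.len
          ((PySem.List.pyRange 0 (PySem.List.len l) 1).foldl
            (fun acc i => acc ++ [pvDigit (PySem.List.pyGetD l i ' ')]) []) + 2) 1).foldl
        (fun nm i => PySem.List.pySetD nm (-i + 1) (PySem.List.pyGetD nm (-i + 1) 0 * i))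
        ((PySem.List.pyRange 0 (PySem.List.len l) 1).foldl
          (fun acc i => acc ++ [pvDigit (PySem.List.pyGetD l i ' ')]) [])).sum
    = (PySem.List.enumerate l 0).foldl
        (fun acc p => acc + pvDigit p.2 * (PySem.List.len l + 1 - p.1)) 0 := by
  rw [PySem.List.foldl_append_singleton_eq_map, List.nil_append]
  rw [show (fun i => pvDigit (PySem.List.pyGetD l i ' '))
        = (pvDigit ∘ fun j => PySem.List.pyGetD l j ' ') from rfl]
  rw [← List.map_map, PySem.List.map_pyGetD_pyRange_zero]
  rw [PySem.List.len_eq (l.map pvDigit), List.length_map]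
  rw [pvLoopA_inv (l.map pvDigit) l.length (by simp)]
  simp only [List.length_map, Nat.sub_self, List.take_zero, List.drop_zero, List.nil_append]
  rw [PySem.List.foldl_add, zero_add]
  rw [pvEnum_wts l 0 (PySem.List.len l + 1), sub_zero, PySem.List.len_eq]

-- ===== VERDICT (by name: the statement is the Claim_ definition above) =====
theorem isbn13_to_10_spec : Claim_equal_isbn13_to_10 := by
  intro is13 _hd _hp
  unfold Spec_isbn13_to_10
  simp only [isbn13_to_10, isbn13_to_10_alt]
  rw [pvTail_eq, pvChecksum_eq]
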